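-- pv_equiv track=rewrite | github.com/xiaobingling93-pixel/Ascend-IndexSDK | feature_retrieval/src/ascendfaiss/ops/tbe/impl/distance_table_build.py | compute_mask
-- ===== SOURCE A (Python) =====
-- def compute_mask(num, mode, tag):
--     if num >= 64:
--         num -= 64
--
--     proj = {
--         0: {0: 15, 1: 240, 2: 3840, 3: 61440},
--         1: {0: 255, 1: 65280}
--     }
--
--     base = proj.get(mode, {}).get(tag)
--     if base is None:
--         raise Exception(f"No defined combination of mode: {mode} and tag: {tag}")
--
--     mask = 0
--     for i in range(num // 16):
--         mask += base << (i * 16)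
--     return mask
-- ===== SOURCE B (Python) =====
-- def compute_mask(num, mode, tag):
--     # base table as tuples indexed by tag (instead of nested dicts)
--     if mode == 0:
--         bases = (15, 240, 3840, 61440)
--     elif mode == 1:
--         bases = (255, 65280)
--     else:
--         bases = ()
--     if not (0 <= tag < len(bases)):
--         raise Exception(f"No defined combination of mode: {mode} and tag: {tag}")
--     base = bases[tag]
--     n = num - 64 if num >= 64 else num
--     k = n // 16
--     # closed-form geometric series: base repeated every 16 bits (base < 2**16, terms never overlap)
--     return 0 if k <= 0 else base * ((1 << (16 * k)) - 1) // 65535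
-- ===== Notes on version B (the rewrite author's own statement) =====
-- stated objective: simpler
-- what changed: Replaced the nested-dict lookup by an if-chain over tag-indexed tuples and the accumulation loop by the closed-form geometric-series expression base * ((1 << (16*k)) - 1) // 65535, valid because each 16-bit base never overlaps between shifted terms.
import Mathlib
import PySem

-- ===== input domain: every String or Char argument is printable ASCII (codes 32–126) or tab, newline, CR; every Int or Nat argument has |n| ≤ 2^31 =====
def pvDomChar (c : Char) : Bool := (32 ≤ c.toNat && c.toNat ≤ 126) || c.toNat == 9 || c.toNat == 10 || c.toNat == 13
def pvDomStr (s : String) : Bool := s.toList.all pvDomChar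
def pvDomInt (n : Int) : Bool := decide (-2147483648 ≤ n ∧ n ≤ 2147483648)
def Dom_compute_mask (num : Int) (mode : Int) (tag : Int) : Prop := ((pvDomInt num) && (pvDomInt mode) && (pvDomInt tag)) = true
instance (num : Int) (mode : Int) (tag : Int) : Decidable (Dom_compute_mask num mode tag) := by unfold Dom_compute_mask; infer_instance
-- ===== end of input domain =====

-- B replaces A's nested-dict lookup by an if-chain over tag-indexed tuples and A's
-- accumulation loop by the closed-form geometric series base * ((1 << 16*k) - 1) // 65535
-- (objective: simpler; no loop executed).

-- ===== PORT A =====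
-- the nested dict literal of A
def pvProj : PySem.Dict Int (PySem.Dict Int Int) :=
  PySem.Dict.ofList
    [(0, PySem.Dict.ofList [(0, 15), (1, 240), (2, 3840), (3, 61440)]),
     (1, PySem.Dict.ofList [(0, 255), (1, 65280)])]

def compute_mask (num : Int) (mode : Int) (tag : Int) : Int :=
  let num := if num ≥ 64 then num - 64 else num
  match (PySem.Dict.getD pvProj mode (PySem.Dict.ofList [])).get? tag with
  | none => 0   -- A raises Exception here; excluded by Pre_compute_mask
  | some base =>
    (PySem.List.pyRange 0 (PySem.Int.floordiv num 16) 1).foldl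
      (fun mask i => mask + (base <<< (i * 16).toNat)) 0

-- ===== PORT B =====
-- B's tag-indexed tuple table, one per mode (empty for unknown modes)
def pvBases (mode : Int) : List Int :=
  if mode = 0 then [15, 240, 3840, 61440]
  else if mode = 1 then [255, 65280]
  else []

def compute_mask_alt (num : Int) (mode : Int) (tag : Int) : Int :=
  let bases := pvBases mode
  if 0 ≤ tag ∧ tag < (bases.length : Int) then
    let base := (PySem.List.pyGet? bases tag).getD 0  -- in range by the guard
    let n := if num ≥ 64 then num - 64 else num
    let k := PySem.Int.floordiv n 16
    if k ≤ 0 then 0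
    else PySem.Int.floordiv (base * (((1 : Int) <<< (16 * k).toNat) - 1)) 65535
  else 0   -- B raises Exception here; excluded by Pre_compute_mask

-- ===== PRECONDITION & SPEC =====
-- Pre_ excludes exactly the (mode, tag) pairs absent from the table, on which both programs raise Exception.
def Pre_compute_mask (_num : Int) (mode : Int) (tag : Int) : Prop :=
  (mode = 0 ∧ (tag = 0 ∨ tag = 1 ∨ tag = 2 ∨ tag = 3)) ∨ (mode = 1 ∧ (tag = 0 ∨ tag = 1))
instance (num : Int) (mode : Int) (tag : Int) : Decidable (Pre_compute_mask num mode tag) := by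
  unfold Pre_compute_mask; infer_instance

def pvWitness_compute_mask : Int × Int × Int := (48, 0, 2)

def Spec_compute_mask (num : Int) (mode : Int) (tag : Int) (out : Int) : Prop := out = compute_mask_alt num mode tag
instance (num : Int) (mode : Int) (tag : Int) (out : Int) : Decidable (Spec_compute_mask num mode tag out) := by unfold Spec_compute_mask; infer_instance

-- ===== CLAIM (what is proved, stated in full; the proofs are below) =====
def Claim_equal_compute_mask : Prop := ∀ (num : Int) (mode : Int) (tag : Int), Dom_compute_mask num mode tag → Pre_compute_mask num mode tag → Spec_compute_mask num mode tag (compute_mask num mode tag)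

-- ===== LEMMAS AND PROOFS =====
-- geometric partial sum ∑_{i<n} 2^(16 i)
def pvGeom : Nat → Int
  | 0 => 0
  | n + 1 => pvGeom n + 2 ^ (16 * n)

lemma pvGeom_mul (n : Nat) : 65535 * pvGeom n = 2 ^ (16 * n) - 1 := by
  induction n with
  | zero => simp [pvGeom]
  | succ n ih =>
    have : 16 * (n + 1) = 16 * n + 16 := by ring
    simp only [pvGeom, this, pow_add]
    linarith [ih]

lemma loop_eq (base : Int) (n : Nat) :
    ((PySem.List.pyRange 0 (n : Int) 1).foldl
      (fun mask i => mask + (base <<< (i * 16).toNat)) 0) = base * pvGeom n := by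
  induction n with
  | zero => simp [pvGeom]
  | succ n ih =>
    have h : (0 : Int) ≤ (n : Int) := by positivity
    have : PySem.List.pyRange 0 ((n : Int) + 1) 1
        = PySem.List.pyRange 0 (n : Int) 1 ++ [(n : Int)] := by
      simpa using PySem.List.pyRange_one_succ_right (a := 0) (b := (n : Int)) h
    push_cast
    rw [this, List.foldl_append, ih]
    have ht : (((n : Int)) * 16).toNat = 16 * n := by omega
    simp only [List.foldl_cons, List.foldl_nil, pvGeom, ht,
      Int.shiftLeft_natCast_right, Int.shiftLeft_eq]
    ring

lemma closed_form (base : Int) (k : Int) (hk : 0 < k) :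
    PySem.Int.floordiv (base * (((1 : Int) <<< (16 * k).toNat) - 1)) 65535 = base * pvGeom k.toNat := by
  have hkn : (16 * k).toNat = 16 * k.toNat := by omega
  have h1 : ((1 : Int) <<< (16 * k).toNat) - 1 = 65535 * pvGeom k.toNat := by
    rw [Int.shiftLeft_eq, one_mul, hkn, pvGeom_mul]
  rw [h1, PySem.Int.floordiv_eq_ediv_of_pos (by norm_num)]
  rw [show base * (65535 * pvGeom k.toNat) = 65535 * (base * pvGeom k.toNat) by ring]
  exact Int.mul_ediv_cancel_left _ (by norm_num)

lemma body_eq (base : Int) (k : Int) :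
    ((PySem.List.pyRange 0 k 1).foldl (fun mask i => mask + (base <<< (i * 16).toNat)) 0)
      = if k ≤ 0 then 0 else PySem.Int.floordiv (base * (((1 : Int) <<< (16 * k).toNat) - 1)) 65535 := by
  by_cases hk : k ≤ 0
  · have he : PySem.List.pyRange 0 k 1 = [] := by
      simp [PySem.List.pyRange_one]; omega
    simp [hk, he]
  · rw [if_neg hk, closed_form base k (by omega)]
    have hkk : k = (k.toNat : Int) := by omega
    rw [hkk, loop_eq, Int.toNat_natCast]

-- ===== VERDICT (by name: the statement is the Claim_ definition above) =====
theorem compute_mask_spec : Claim_equal_compute_mask := by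
  intro num mode tag _ hpre
  unfold Spec_compute_mask compute_mask compute_mask_alt pvBases
  rcases hpre with ⟨hm, ht⟩ | ⟨hm, ht⟩ <;> subst hm
  · rcases ht with h | h | h | h <;> subst h <;>
      simpa [pvProj, PySem.List.pyGet?, PySem.List.pyIdx?] using body_eq _ _
  · rcases ht with h | h <;> subst h <;>
      simpa [pvProj, PySem.List.pyGet?, PySem.List.pyIdx?] using body_eq _ _
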